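-- pv_equiv track=rewrite | github.com/vasilylp/HW1 | Seminar1_HW.py | months_purchases
-- ===== SOURCE A (Python) =====
-- def months_purchases(keys: list, values: list)-> dict:    # вариант 2
--     dict_res = {}
--     for i in range(len(keys)):
--         month = keys[i][5:7]
--         if month not in dict_res:
--             dict_res[month] = values[i]
--         else:
--             dict_res[month] += values[i]
--     return dict_res
-- ===== SOURCE B (Python) =====
-- def months_purchases(keys: list, values: list) -> dict:    # group-by-first-key recursion instead of one-pass dict accumulation
--     pairs = [(keys[i][5:7], values[i]) for i in range(len(keys))]
--
--     def agg(ps):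
--         if not ps:
--             return {}
--         m = ps[0][0]
--         total = sum(v for k, v in ps if k == m)
--         rest = agg([(k, v) for k, v in ps if k != m])
--         return {m: total, **rest}
--
--     return agg(pairs)
-- ===== Notes on version B (the rewrite author's own statement) =====
-- stated objective: alternative
-- what changed: A accumulates month totals in one pass over the keys with a dict; B first materialises the (month, value) pair list, then recursively emits the head's month with its total over the whole list and recurses on the pairs whose month differs (group-by-first-key recursion).
import Mathlib
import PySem

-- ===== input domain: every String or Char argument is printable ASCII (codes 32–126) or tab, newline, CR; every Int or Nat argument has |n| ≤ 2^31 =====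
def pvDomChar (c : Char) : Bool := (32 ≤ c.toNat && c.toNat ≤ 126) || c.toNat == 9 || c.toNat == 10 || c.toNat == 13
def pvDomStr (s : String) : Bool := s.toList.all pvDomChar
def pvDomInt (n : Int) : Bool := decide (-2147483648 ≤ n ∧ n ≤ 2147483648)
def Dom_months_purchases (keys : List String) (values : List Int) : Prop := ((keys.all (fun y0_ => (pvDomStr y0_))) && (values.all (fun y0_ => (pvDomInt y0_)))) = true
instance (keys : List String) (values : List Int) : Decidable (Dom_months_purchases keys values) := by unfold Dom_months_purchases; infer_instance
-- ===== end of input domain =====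

-- B replaces A's one-pass dict accumulation by a group-by-first-month recursion (total the head's month over the whole pair list, recurse on the pairs with other months); alternative decomposition, same result and order.


-- ===== PORT A =====
def months_purchases (keys : List String) (values : List Int) : List (String × Int) :=
  ((PySem.List.pyRange 0 (keys.length : Int) 1).foldl
    (fun dict_res i =>
      let month := PySem.Str.slice (PySem.List.pyGetD keys i "") (some 5) (some 7)
      if dict_res.contains month = false then
        dict_res.insert month (PySem.List.pyGetD values i 0)
      else
        dict_res.insert month (dict_res.getD month 0 + PySem.List.pyGetD values i 0))
    PySem.Dict.empty).items

-- ===== PORT B =====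
-- pairs = [(keys[i][5:7], values[i]) for i in range(len(keys))]
def pvPairs (keys : List String) (values : List Int) : List (String × Int) :=
  (PySem.List.pyRange 0 (keys.length : Int) 1).map
    (fun i => (PySem.Str.slice (PySem.List.pyGetD keys i "") (some 5) (some 7),
               PySem.List.pyGetD values i 0))

-- agg: the head's month with its total over all of ps, then recurse on the pairs with a different month
def pvAgg : List (String × Int) → List (String × Int)
  | [] => []
  | q :: t =>
    (q.1, (((q :: t).filter (fun p => p.1 == q.1)).map (fun p => p.2)).sum)
      :: pvAgg ((q :: t).filter (fun p => !(p.1 == q.1)))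
  termination_by ps => ps.length
  decreasing_by
    simp only [List.filter_cons, beq_self_eq_true, Bool.not_true, List.length_cons,
      if_false, Bool.false_eq_true]
    exact Nat.lt_succ_of_le (List.length_filter_le _ _)

def months_purchases_alt (keys : List String) (values : List Int) : List (String × Int) :=
  pvAgg (pvPairs keys values)

-- ===== PRECONDITION & SPEC =====
-- Pre_ excludes exactly the inputs where Python A raises IndexError: values[i] with len(values) < len(keys).
def Pre_months_purchases (keys : List String) (values : List Int) : Prop :=
  keys.length ≤ values.length
instance (keys : List String) (values : List Int) : Decidable (Pre_months_purchases keys values) := by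
  unfold Pre_months_purchases; infer_instance

def pvWitness_months_purchases : List String × List Int :=
  (["2021-01-05", "2021-01-07", "2021-02-01"], [3, 4, 5])

def Spec_months_purchases (keys : List String) (values : List Int) (out : List (String × Int)) : Prop := out = months_purchases_alt keys values
instance (keys : List String) (values : List Int) (out : List (String × Int)) : Decidable (Spec_months_purchases keys values out) := by unfold Spec_months_purchases; infer_instance

-- ===== CLAIM (what is proved, stated in full; the proofs are below) =====
def Claim_equal_months_purchases : Prop := ∀ (keys : List String) (values : List Int), Dom_months_purchases keys values → Pre_months_purchases keys values → Spec_months_purchases keys values (months_purchases keys values)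

-- ===== LEMMAS AND PROOFS =====

-- the per-month total of a list of (month, value) pairs
def pvSumKey (ps : List (String × Int)) (m : String) : Int :=
  ((ps.filter (fun q => q.1 == m)).map (fun q => q.2)).sum

-- A's loop step, written as a single insert
def pvStep (d : PySem.Dict String Int) (q : String × Int) : PySem.Dict String Int :=
  d.insert q.1 (if d.contains q.1 then d.getD q.1 0 + q.2 else q.2)

theorem pvStep_eq (d : PySem.Dict String Int) (m : String) (v : Int) :
    (if d.contains m = false then d.insert m v
     else d.insert m (d.getD m 0 + v)) = pvStep d (m, v) := by
  unfold pvStep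
  cases h : d.contains m <;> simp

-- first-occurrence dedup commutes with filter
theorem pvOfList_filter {α : Type} [BEq α] [LawfulBEq α] (l : List α) (p : α → Bool) :
    (PySem.Set.ofList l).filter p = PySem.Set.ofList (l.filter p) := by
  induction l using List.reverseRecOn with
  | nil => rfl
  | append_singleton l y ih =>
    rw [PySem.Set.ofList_append_singleton, List.filter_append, PySem.Set.add_eq_ite]
    by_cases hp : p y
    · have h2 : List.filter p [y] = [y] := by simp [hp]
      rw [h2, PySem.Set.ofList_append_singleton, PySem.Set.add_eq_ite, ← ih]
      have hmem : y ∈ (PySem.Set.ofList l).filter p ↔ y ∈ PySem.Set.ofList l := by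
        simp [List.mem_filter, hp]
      by_cases hy : y ∈ PySem.Set.ofList l
      · simp [hy, hmem.mpr hy]
      · simp [hy, List.filter_append, hp]
    · have hp' : p y = false := by simpa using hp
      have h2 : List.filter p [y] = [] := by simp [hp']
      rw [h2, List.append_nil, ← ih]
      by_cases hy : y ∈ PySem.Set.ofList l
      · simp [hy]
      · simp [hy, List.filter_append, hp']

-- first-occurrence dedup of a cons
theorem pvDedup_cons {α : Type} [BEq α] [LawfulBEq α] (x : α) (l : List α) :
    PySem.Set.ofList (x :: l) = x :: PySem.Set.ofList (l.filter (fun y => !(y == x))) := by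
  rw [PySem.Set.ofList_cons]
  show _ :: List.filter _ _ = _
  rw [pvOfList_filter]

-- the dict built by A's loop, looked up at any month
theorem pvGetD_fold (ps : List (String × Int)) (d : PySem.Dict String Int) (m : String) :
    (ps.foldl pvStep d).getD m 0 = d.getD m 0 + pvSumKey ps m := by
  induction ps generalizing d with
  | nil => simp [pvSumKey]
  | cons q t ih =>
    simp only [List.foldl_cons]
    rw [ih]
    unfold pvStep pvSumKey
    rw [PySem.Dict.getD_insert]
    by_cases hm : m = q.1
    · subst hm
      simp only [List.filter_cons, beq_self_eq_true, if_true, List.map_cons, List.sum_cons]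
      cases hc : d.contains q.1
      · rw [PySem.Dict.getD_of_not_contains d 0 hc]
        simp
      · simp [add_assoc]
    · have hb : (q.1 == m) = false := beq_eq_false_iff_ne.mpr (fun h => hm h.symm)
      simp [hm, hb]

theorem pvKeys_fold (ps : List (String × Int)) :
    (ps.foldl pvStep PySem.Dict.empty).keys = PySem.Set.ofList (ps.map (fun q => q.1)) := by
  have h := PySem.Dict.keys_foldl_insert_key ps (fun q : String × Int => q.1)
    (fun d q => if d.contains q.1 then d.getD q.1 0 + q.2 else q.2) PySem.Dict.empty
  rw [show pvStep = (fun (d : PySem.Dict String Int) (q : String × Int) =>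
    d.insert q.1 (if d.contains q.1 then d.getD q.1 0 + q.2 else q.2)) from rfl]
  rw [h, PySem.Dict.keys_empty, PySem.Set.update_nil_left]

theorem pvNodup_fold (ps : List (String × Int)) :
    (ps.foldl pvStep PySem.Dict.empty).keys.Nodup := by
  have h := PySem.Dict.nodup_keys_foldl_insert_key ps (fun q : String × Int => q.1)
    (fun d q => if d.contains q.1 then d.getD q.1 0 + q.2 else q.2) PySem.Dict.empty
  rw [show pvStep = (fun (d : PySem.Dict String Int) (q : String × Int) =>
    d.insert q.1 (if d.contains q.1 then d.getD q.1 0 + q.2 else q.2)) from rfl]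
  exact h (by rw [PySem.Dict.keys_empty]; exact List.nodup_nil)

-- A's result in canonical form: distinct months in first-occurrence order, each with its total
theorem pvItems_fold (ps : List (String × Int)) :
    (ps.foldl pvStep PySem.Dict.empty).items
      = (PySem.Set.ofList (ps.map (fun q => q.1))).map (fun m => (m, pvSumKey ps m)) := by
  rw [PySem.Dict.items_eq_map_keys _ (pvNodup_fold ps) 0, pvKeys_fold]
  refine List.map_congr_left ?_
  intro m _
  rw [pvGetD_fold, PySem.Dict.getD_empty, zero_add]

-- B's result in the same canonical form
theorem pvAgg_eq (ps : List (String × Int)) :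
    pvAgg ps = (PySem.Set.ofList (ps.map (fun q => q.1))).map (fun m => (m, pvSumKey ps m)) := by
  induction ps using pvAgg.induct with
  | case1 => simp [pvAgg]
  | case2 q t ih =>
    rw [pvAgg]
    rw [List.map_cons, pvDedup_cons, List.map_cons]
    have hfc : (q :: t).filter (fun p => !(p.1 == q.1)) = t.filter (fun p => !(p.1 == q.1)) := by
      simp
    rw [hfc] at ih ⊢
    rw [ih]
    have hmf : (t.map (fun q => q.1)).filter (fun y => !(y == q.1))
        = (t.filter (fun p => !(p.1 == q.1))).map (fun q => q.1) := by
      rw [List.filter_map]; rfl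
    rw [hmf]
    congr 1
    refine List.map_congr_left ?_
    intro m hm
    have hmne : m ≠ q.1 := by
      have h1 : m ∈ (t.filter (fun p => !(p.1 == q.1))).map (fun q => q.1) :=
        (PySem.Set.mem_ofList _ _).mp hm
      obtain ⟨p, hp, rfl⟩ := List.mem_map.mp h1
      have := (List.mem_filter.mp hp).2
      simpa using this
    congr 1
    unfold pvSumKey
    rw [List.filter_filter]
    have hpt : ∀ x : String × Int, ((x.1 == m) && !(x.1 == q.1)) = (x.1 == m) := by
      intro x
      by_cases hx : x.1 = m
      · simp [hx, hmne]
      · simp [hx]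
    rw [List.filter_congr (fun x _ => hpt x)]
    have hhd : (q :: t).filter (fun p => p.1 == m) = t.filter (fun p => p.1 == m) := by
      simp [beq_eq_false_iff_ne.mpr (fun h => hmne h.symm)]
    rw [hhd]

-- ===== VERDICT (by name: the statement is the Claim_ definition above) =====
theorem months_purchases_spec : Claim_equal_months_purchases := by
  intro keys values _ _
  show months_purchases keys values = months_purchases_alt keys values
  have h1 : months_purchases keys values
      = ((pvPairs keys values).foldl pvStep PySem.Dict.empty).items := by
    unfold months_purchases pvPairs
    rw [List.foldl_map]
    have hf : (fun (dict_res : PySem.Dict String Int) (i : Int) =>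
        let month := PySem.Str.slice (PySem.List.pyGetD keys i "") (some 5) (some 7)
        if dict_res.contains month = false then dict_res.insert month (PySem.List.pyGetD values i 0)
        else dict_res.insert month (dict_res.getD month 0 + PySem.List.pyGetD values i 0))
        = (fun (d : PySem.Dict String Int) (i : Int) =>
            pvStep d (PySem.Str.slice (PySem.List.pyGetD keys i "") (some 5) (some 7),
                      PySem.List.pyGetD values i 0)) := by
      funext d i
      exact pvStep_eq d _ _
    rw [hf]
  rw [h1, pvItems_fold]
  show _ = pvAgg (pvPairs keys values)
  rw [pvAgg_eq]
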